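-- pv_equiv track=rewrite | github.com/yooah/MEMCover | mut_ex/mut_ex.py | comp_type_dic
-- ===== SOURCE A (Python) =====
-- def comp_type_dic(original_gene_dic, type_idx_dic):
-- 	"""
-- 	divide the given mut_dic into each type
-- 	:param original_gene_dic: gene-> set of covered samples
-- 	:param type_idx_dic: cancer type -> set of samples
-- 	:return:original_gene_type_dic: cancer type -> gene -> set of covered samples
-- 	"""
--
-- 	original_gene_type_dic = {}
-- 	for can in type_idx_dic:
-- 		temp_dic = {}
-- 		can_idx = type_idx_dic[can]
-- 		for gene in original_gene_dic:
-- 			temp_dic[gene] = set(original_gene_dic[gene]).intersection(can_idx)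
-- 		original_gene_type_dic[can] = temp_dic
--
-- 	return original_gene_type_dic
-- ===== SOURCE B (Python) =====
-- def comp_type_dic(original_gene_dic, type_idx_dic):
--     """
--     Inverted-index version: distribute each gene's samples to the cancer types
--     that contain them, instead of intersecting every gene with every type set.
--     """
--     # sample -> list of cancer types whose sample set contains it
--     sample_types = {}
--     for can, idx in type_idx_dic.items():
--         for s in dict.fromkeys(idx):
--             sample_types.setdefault(s, []).append(can)
--     # pre-initialise every (type, gene) cell with a fresh empty set
--     result = {can: {gene: set() for gene in original_gene_dic}
--               for can in type_idx_dic}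
--     # one pass over the genes' samples, routed through the index
--     for gene, samples in original_gene_dic.items():
--         for s in dict.fromkeys(samples):
--             for can in sample_types.get(s, []):
--                 result[can][gene].add(s)
--     return result
-- ===== Notes on version B (the rewrite author's own statement) =====
-- stated objective: alternative
-- what changed: Replaces the per-type/per-gene set intersections by an inverted index sample->cancer-types built once, a pre-initialised type->gene->empty-set table, and one pass over the genes' deduplicated samples that routes each sample to every type containing it.
import Mathlib
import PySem

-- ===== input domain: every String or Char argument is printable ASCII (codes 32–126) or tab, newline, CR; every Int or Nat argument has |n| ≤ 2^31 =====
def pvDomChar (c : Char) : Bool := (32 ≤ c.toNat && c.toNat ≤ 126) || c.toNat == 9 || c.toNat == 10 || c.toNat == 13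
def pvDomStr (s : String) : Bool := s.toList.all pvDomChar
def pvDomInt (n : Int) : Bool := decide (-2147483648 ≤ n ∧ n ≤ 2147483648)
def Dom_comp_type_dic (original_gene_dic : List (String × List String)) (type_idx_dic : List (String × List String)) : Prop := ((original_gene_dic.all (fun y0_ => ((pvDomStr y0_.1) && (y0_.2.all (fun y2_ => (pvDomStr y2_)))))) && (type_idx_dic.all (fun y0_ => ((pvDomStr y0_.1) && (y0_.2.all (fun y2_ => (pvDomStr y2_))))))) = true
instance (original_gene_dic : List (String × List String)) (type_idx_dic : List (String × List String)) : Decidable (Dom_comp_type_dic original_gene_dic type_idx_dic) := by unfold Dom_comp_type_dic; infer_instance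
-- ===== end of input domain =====

-- B replaces A's per-type × per-gene set intersections by an inverted index
-- sample -> cancer types plus one distribution pass over the genes' samples
-- (objective: alternative algorithm; equivalence is proved for the return value).
-- Both dict parameters are association lists; each port first collapses its
-- arguments with PySem.Dict.ofList (the dict the Python function receives) and
-- iterates its items; d[k] during 'for k in d' is the paired value (keys unique).

-- ===== PORT A =====
def comp_type_dic (original_gene_dic : List (String × List String)) (type_idx_dic : List (String × List String)) : List (String × List (String × List String)) :=
  let ogd := (PySem.Dict.ofList original_gene_dic).items
  let tid := (PySem.Dict.ofList type_idx_dic).items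
  -- original_gene_type_dic = {}; for can in type_idx_dic: …  (fresh keys append)
  tid.foldl (fun out ct =>
    -- temp_dic = {}; for gene in original_gene_dic: temp_dic[gene] = set(original_gene_dic[gene]).intersection(can_idx)
    out ++ [(ct.1, ogd.foldl (fun temp g =>
      temp ++ [(g.1, PySem.Set.inter (PySem.Set.ofList g.2) ct.2)]) [])]) []

-- ===== PORT B =====
-- result[can][gene].add(s) on the association-list representation of B's nested
-- dict (keys are unique, so updating every matching key updates the one entry)
def pvG (gene s : String) (g : String × List String) : String × List String :=
  if g.1 == gene then (g.1, PySem.Set.add g.2 s) else g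

def pvStep (gene s can : String) (ct : String × List (String × List String)) : String × List (String × List String) :=
  if ct.1 == can then (ct.1, ct.2.map (pvG gene s)) else ct

def pvAdd2 (res : List (String × List (String × List String))) (can gene s : String) : List (String × List (String × List String)) :=
  res.map (pvStep gene s can)

def comp_type_dic_alt (original_gene_dic : List (String × List String)) (type_idx_dic : List (String × List String)) : List (String × List (String × List String)) :=
  let ogd := (PySem.Dict.ofList original_gene_dic).items
  let tid := (PySem.Dict.ofList type_idx_dic).items
  -- sample_types: sample -> list of cancer types containing it (setdefault+append = modify)
  let sampleTypes : PySem.Dict String (List String) :=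
    tid.foldl (fun st ct =>
      (PySem.List.dedup ct.2).foldl (fun st s => st.modify s [] (· ++ [ct.1])) st) PySem.Dict.empty
  -- result = {can: {gene: set() for gene in original_gene_dic} for can in type_idx_dic}
  let init : List (String × List (String × List String)) :=
    tid.map (fun ct => (ct.1, ogd.map (fun g => (g.1, ([] : List String)))))
  -- for gene, samples in …: for s in dict.fromkeys(samples): for can in sample_types.get(s, []): result[can][gene].add(s)
  ogd.foldl (fun res g =>
    (PySem.List.dedup g.2).foldl (fun res s =>
      (sampleTypes.getD s []).foldl (fun res can => pvAdd2 res can g.1 s) res) res) init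

-- ===== PRECONDITION & SPEC =====
def Spec_comp_type_dic (original_gene_dic : List (String × List String)) (type_idx_dic : List (String × List String)) (out : List (String × List (String × List String))) : Prop := out = comp_type_dic_alt original_gene_dic type_idx_dic
instance (original_gene_dic : List (String × List String)) (type_idx_dic : List (String × List String)) (out : List (String × List (String × List String))) : Decidable (Spec_comp_type_dic original_gene_dic type_idx_dic out) := by unfold Spec_comp_type_dic; infer_instance

-- ===== CLAIM (what is proved, stated in full; the proofs are below) =====
def Claim_equal_comp_type_dic : Prop := ∀ (original_gene_dic : List (String × List String)) (type_idx_dic : List (String × List String)), Dom_comp_type_dic original_gene_dic type_idx_dic → Spec_comp_type_dic original_gene_dic type_idx_dic (comp_type_dic original_gene_dic type_idx_dic)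

-- ===== LEMMAS AND PROOFS =====

-- a fold whose every step is a List.map acts entrywise
theorem pv_foldl_map_out {α β : Type} (L : List β) (g : β → α → α) (res : List α) :
    L.foldl (fun r b => r.map (g b)) res = res.map (fun a => L.foldl (fun a b => g b a) a) := by
  induction L generalizing res with
  | nil => simp
  | cons b L ih => simp [ih, List.map_map, Function.comp_def]

theorem pv_map_ite {α : Type} (c : Prop) [Decidable c] (l : List α) (u : α → α) :
    (if c then l.map u else l) = l.map (fun x => if c then u x else x) := by
  split <;> simp

theorem pv_add_idem {s : String} {v : List String} :
    PySem.Set.add (PySem.Set.add v s) s = PySem.Set.add v s := by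
  apply PySem.Set.add_of_mem
  simp [PySem.Set.mem_add]

-- characterisation of the inner sample_types loop for one cancer type
theorem pv_st_inner (l : List String) (a x c : String) (d : PySem.Dict String (List String)) :
    c ∈ ((l.foldl (fun d s => d.modify s [] (· ++ [a])) d).getD x []) ↔
      c ∈ d.getD x [] ∨ (c = a ∧ x ∈ l) := by
  induction l generalizing d with
  | nil => simp
  | cons s l ih =>
    simp only [List.foldl_cons, ih, PySem.Dict.getD_modify]
    by_cases hx : x = s
    · subst hx; simp; tauto
    · simp [hx]

-- characterisation of the whole sample_types index
theorem pv_st_mem (L : List (String × List String)) (x c : String) (d : PySem.Dict String (List String)) :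
    c ∈ ((L.foldl (fun st ct => (PySem.List.dedup ct.2).foldl (fun st s => st.modify s [] (· ++ [ct.1])) st) d).getD x []) ↔
      c ∈ d.getD x [] ∨ ∃ p ∈ L, p.1 = c ∧ x ∈ p.2 := by
  induction L generalizing d with
  | nil => simp
  | cons ct L ih =>
    rw [List.foldl_cons, ih, pv_st_inner]
    simp only [PySem.List.mem_dedup, List.mem_cons]
    constructor
    · rintro (⟨h | ⟨rfl, hx⟩⟩ | ⟨p, hp, rfl, hx⟩)
      · exact Or.inl h
      · exact Or.inr ⟨ct, Or.inl rfl, rfl, hx⟩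
      · exact Or.inr ⟨p, Or.inr hp, rfl, hx⟩
    · rintro (h | ⟨p, hp, rfl, hx⟩)
      · exact Or.inl (Or.inl h)
      · rcases hp with rfl | hp
        · exact Or.inl (Or.inr ⟨rfl, hx⟩)
        · exact Or.inr ⟨p, hp, rfl, hx⟩

-- in a list whose keys are unique, equal keys mean equal pairs
theorem pv_key_uniq {ν : Type} {L : List (String × ν)} (h : (L.map Prod.fst).Nodup)
    {p q : String × ν} (hp : p ∈ L) (hq : q ∈ L) (hk : p.1 = q.1) : p = q := by
  induction L with
  | nil => cases hp
  | cons r L ih =>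
    simp only [List.map_cons, List.nodup_cons] at h
    rcases List.mem_cons.mp hp with rfl | hp' <;> rcases List.mem_cons.mp hq with rfl | hq'
    · rfl
    · exact absurd (hk ▸ List.mem_map_of_mem hq') h.1
    · exact absurd (hk ▸ List.mem_map_of_mem hp') h.1
    · exact ih h.2 hp' hq'

-- building a set by conditional adds over a duplicate-free list is a filter
theorem pv_fold_filter (l : List String) (idx : List String) (v : List String)
    (hl : l.Nodup) (hv : ∀ s ∈ l, s ∉ v) :
    l.foldl (fun v s => if s ∈ idx then PySem.Set.add v s else v) v
      = v ++ l.filter (fun s => idx.contains s) := by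
  induction l generalizing v with
  | nil => simp
  | cons s l ih =>
    rcases List.nodup_cons.mp hl with ⟨hs, hl'⟩
    by_cases h : s ∈ idx
    · have : PySem.Set.add v s = v ++ [s] :=
        PySem.Set.add_of_not_mem (hv s (List.mem_cons_self))
      simp only [List.foldl_cons, if_pos h, this]
      rw [ih _ hl' (by intro t ht; simp [List.mem_append]; exact ⟨hv t (List.mem_cons_of_mem _ ht), fun e => hs (e ▸ ht)⟩)]
      simp [h]
    · simp only [List.foldl_cons, if_neg h]
      rw [ih _ hl' (fun t ht => hv t (List.mem_cons_of_mem _ ht))]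
      simp [h]


theorem pv_pvG_comp (g1 s : String) (x : String × List String) :
    pvG g1 s (pvG g1 s x) = pvG g1 s x := by
  unfold pvG
  by_cases h : x.1 = g1 <;> simp [h, pv_add_idem]

-- threading the cancer-type key through the innermost update loop
theorem pv_E3 (cs : List String) (g1 s can : String) (d : List (String × List String)) :
    cs.foldl (fun a c => pvStep g1 s c a) (can, d)
      = (can, if can ∈ cs then d.map (pvG g1 s) else d) := by
  induction cs generalizing d with
  | nil => simp
  | cons c cs ih =>
    by_cases h : can = c
    · subst h
      rw [List.foldl_cons, show pvStep g1 s can (can, d) = (can, d.map (pvG g1 s)) from by simp [pvStep], ih]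
      simp [List.map_map, Function.comp_def, pv_pvG_comp]
    · rw [List.foldl_cons, show pvStep g1 s c (can, d) = (can, d) from by simp [pvStep, h], ih]
      simp [h]

theorem pv_E2 (ss : List String) (g1 can : String) (ST : PySem.Dict String (List String)) (d : List (String × List String)) :
    ss.foldl (fun a s => (ST.getD s []).foldl (fun a c => pvStep g1 s c a) a) (can, d)
      = (can, ss.foldl (fun d s => if can ∈ ST.getD s [] then d.map (pvG g1 s) else d) d) := by
  induction ss generalizing d with
  | nil => simp
  | cons s ss ih => rw [List.foldl_cons, pv_E3, ih, List.foldl_cons]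

theorem pv_E1 (L : List (String × List String)) (can : String) (ST : PySem.Dict String (List String)) (d : List (String × List String)) :
    L.foldl (fun a g => (PySem.List.dedup g.2).foldl (fun a s => (ST.getD s []).foldl (fun a c => pvStep g.1 s c a) a) a) (can, d)
      = (can, L.foldl (fun d g => (PySem.List.dedup g.2).foldl (fun d s => if can ∈ ST.getD s [] then d.map (pvG g.1 s) else d) d) d) := by
  induction L generalizing d with
  | nil => simp
  | cons g L ih => rw [List.foldl_cons, pv_E2, ih, List.foldl_cons]

-- threading the gene key through the per-gene update loop
theorem pv_F2 (l : List String) (P : String → Prop) [DecidablePred P] (g1 k : String) (v : List String) :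
    l.foldl (fun x s => if P s then pvG g1 s x else x) (k, v)
      = (k, if k = g1 then l.foldl (fun v s => if P s then PySem.Set.add v s else v) v else v) := by
  induction l generalizing v with
  | nil => simp
  | cons s l ih =>
    rw [List.foldl_cons]
    by_cases hP : P s
    · rw [if_pos hP]
      by_cases hk : k = g1
      · subst hk
        rw [show pvG k s (k, v) = (k, PySem.Set.add v s) from by simp [pvG], ih]
        simp [hP]
      · rw [show pvG g1 s (k, v) = (k, v) from by simp [pvG, hk], ih]
        simp [hk]
    · rw [if_neg hP, ih]
      simp [hP]

theorem pv_F1 (L : List (String × List String)) (P : String → Prop) [DecidablePred P] (k : String) (v : List String) :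
    L.foldl (fun x g => (PySem.List.dedup g.2).foldl (fun x s => if P s then pvG g.1 s x else x) x) (k, v)
      = (k, L.foldl (fun v g => if k = g.1 then (PySem.List.dedup g.2).foldl (fun v s => if P s then PySem.Set.add v s else v) v else v) v) := by
  induction L generalizing v with
  | nil => simp
  | cons g L ih =>
    rw [List.foldl_cons, pv_F2, ih, List.foldl_cons]

-- a key-guarded fold over entries none of which match is the identity
theorem pv_fold_id (L : List (String × List String)) (k : String)
    (step : String × List String → List String → List String) (v : List String)
    (h : ∀ g ∈ L, g.1 ≠ k) :
    L.foldl (fun v g => if k = g.1 then step g v else v) v = v := by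
  induction L generalizing v with
  | nil => rfl
  | cons r L ih =>
    rw [List.foldl_cons, if_neg (fun e => h r List.mem_cons_self e.symm)]
    exact ih v (fun g hg => h g (List.mem_cons_of_mem _ hg))

-- with unique keys, a key-guarded fold acts exactly once, at the matching entry
theorem pv_fold_unique (L : List (String × List String)) (hnd : (L.map Prod.fst).Nodup)
    {g0 : String × List String} (hg : g0 ∈ L)
    (step : String × List String → List String → List String) (v : List String) :
    L.foldl (fun v g => if g0.1 = g.1 then step g v else v) v = step g0 v := by
  induction L generalizing v with
  | nil => cases hg
  | cons r L ih =>
    simp only [List.map_cons, List.nodup_cons] at hnd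
    rcases List.mem_cons.mp hg with rfl | hg'
    · rw [List.foldl_cons, if_pos rfl]
      apply pv_fold_id
      intro g hgL e
      exact hnd.1 (by rw [← e]; exact List.mem_map_of_mem (f := Prod.fst) hgL)
    · rw [List.foldl_cons, if_neg ?_]
      · exact ih hnd.2 hg' v
      · intro e
        exact hnd.1 (by rw [← e]; exact List.mem_map_of_mem (f := Prod.fst) hg')

-- ===== VERDICT (by name: the statement is the Claim_ definition above) =====
theorem comp_type_dic_spec : Claim_equal_comp_type_dic := by
  intro o t _
  unfold Spec_comp_type_dic comp_type_dic comp_type_dic_alt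
  simp only [PySem.List.foldl_append_singleton_eq_map, List.nil_append, pvAdd2,
    pv_foldl_map_out, List.map_map]
  apply List.map_congr_left
  intro ct hct
  have hT : (((PySem.Dict.ofList t).items.map Prod.fst)).Nodup := by
    simpa [PySem.Dict.keys] using PySem.Dict.nodup_keys_ofList (ν := List String) t
  have hO : (((PySem.Dict.ofList o).items.map Prod.fst)).Nodup := by
    simpa [PySem.Dict.keys] using PySem.Dict.nodup_keys_ofList (ν := List String) o
  have hiff : ∀ s : String,
      (ct.1 ∈ (((PySem.Dict.ofList t).items.foldl
          (fun st ct => (PySem.List.dedup ct.2).foldl (fun st s => st.modify s [] (· ++ [ct.1])) st)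
          PySem.Dict.empty).getD s [])) ↔ s ∈ ct.2 := by
    intro s
    rw [pv_st_mem]
    simp only [PySem.Dict.getD_empty, List.not_mem_nil, false_or]
    constructor
    · rintro ⟨p, hp, hpk, hs⟩
      exact (pv_key_uniq hT hp hct hpk) ▸ hs
    · intro hs
      exact ⟨ct, hct, rfl, hs⟩
  simp only [Function.comp_apply]
  rw [pv_E1]
  simp only [Prod.mk.injEq, true_and]
  simp only [pv_map_ite, pv_foldl_map_out, List.map_map]
  symm
  apply List.map_congr_left
  intro g hg
  simp only [Function.comp_apply]
  rw [pv_F1, pv_fold_unique _ hO hg]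
  rw [PySem.List.foldl_congr_mem _ _ (fun v s => if s ∈ ct.2 then PySem.Set.add v s else v) _
    (fun acc s hs => if_congr (hiff s) rfl rfl)]
  rw [pv_fold_filter _ _ _ (PySem.List.nodup_dedup g.2) (by simp)]
  simp [PySem.Set.inter, PySem.List.dedup]
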